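-- pv_equiv track=rewrite | github.com/DegeneratorX/construcao-e-analise-de-algoritmos | aula01-04/1_selection_sort.py | posicao_maior_fisch
-- ===== SOURCE A (Python) =====
-- def posicao_maior_fisch(lista, inicio, fim):
--     maior = lista[inicio]
--     indice_maior = inicio
--     for i in range(inicio+1, fim+1):
--         if lista[i] > maior:
--             maior = lista[i]
--             indice_maior = i
--     return indice_maior
-- ===== SOURCE B (Python) =====
-- def _maior(lista, i, f):
--     # (value, index) of the largest element of lista[i..f], leftmost on ties
--     if f <= i:
--         return lista[i], i
--     m = (i + f) // 2
--     ve, e = _maior(lista, i, m)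
--     vd, d = _maior(lista, m + 1, f)
--     return (vd, d) if vd > ve else (ve, e)
--
-- def posicao_maior_fisch(lista, inicio, fim):
--     return _maior(lista, inicio, fim)[1]
-- ===== Notes on version B (the rewrite author's own statement) =====
-- stated objective: alternative
-- what changed: Replaced A's single left-to-right scan carrying a running (max, index) pair by a recursive divide-and-conquer helper that splits [inicio, fim] at the midpoint, returns (value, index) pairs, and combines with a strict > so the leftmost index wins ties.
import Mathlib
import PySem

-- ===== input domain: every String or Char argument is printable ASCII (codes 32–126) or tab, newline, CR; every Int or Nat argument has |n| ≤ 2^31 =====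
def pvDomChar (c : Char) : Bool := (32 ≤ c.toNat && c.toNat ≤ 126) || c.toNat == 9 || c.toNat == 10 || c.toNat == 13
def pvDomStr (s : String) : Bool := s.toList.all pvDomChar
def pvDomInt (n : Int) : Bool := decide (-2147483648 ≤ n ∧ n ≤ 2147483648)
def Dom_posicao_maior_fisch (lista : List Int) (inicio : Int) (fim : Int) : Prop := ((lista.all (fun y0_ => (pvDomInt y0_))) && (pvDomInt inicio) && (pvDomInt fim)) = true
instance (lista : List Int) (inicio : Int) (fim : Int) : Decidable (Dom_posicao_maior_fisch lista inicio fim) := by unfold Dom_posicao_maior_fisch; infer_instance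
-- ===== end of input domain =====

-- B replaces A's left-to-right scan by a recursive divide-and-conquer over the index range (alternative decomposition, same cost).


-- ===== PORT A =====
-- maior/indice_maior pair folded over range(inicio+1, fim+1); lista[i] is total here
-- via pyGetD (Pre_ guarantees every access is in range, so the default is never used).
def posicao_maior_fisch (lista : List Int) (inicio : Int) (fim : Int) : Int :=
  (((PySem.List.pyRange (inicio + 1) (fim + 1) 1).foldl
      (fun (s : Int × Int) i =>
        if PySem.List.pyGetD lista i 0 > s.1 then (PySem.List.pyGetD lista i 0, i) else s)
      (PySem.List.pyGetD lista inicio 0, inicio))).2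

-- ===== PORT B =====
-- termination helper: the midpoint strictly splits a nonempty range
theorem pvMid_lt (inicio fim : Int) (h : ¬ fim ≤ inicio) :
    PySem.Int.floordiv (inicio + fim) 2 < fim := by
  rw [PySem.Int.floordiv_lt_iff_lt_mul (by omega)]; omega

theorem pvMid_ge (inicio fim : Int) (h : ¬ fim ≤ inicio) :
    inicio ≤ PySem.Int.floordiv (inicio + fim) 2 := by
  rw [PySem.Int.le_floordiv_iff_mul_le (by omega)]; omega

-- _maior: (value, index) of the largest element of lista[i..f], leftmost on ties
def pvMaiorAux (lista : List Int) (i : Int) (f : Int) : Int × Int :=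
  if h : f ≤ i then (PySem.List.pyGetD lista i 0, i)
  else
    let m := PySem.Int.floordiv (i + f) 2
    let l := pvMaiorAux lista i m
    let r := pvMaiorAux lista (m + 1) f
    if r.1 > l.1 then r else l
termination_by (f - i).toNat
decreasing_by
  · have := pvMid_lt i f h; have := pvMid_ge i f h; omega
  · have := pvMid_lt i f h; have := pvMid_ge i f h; omega

def posicao_maior_fisch_alt (lista : List Int) (inicio : Int) (fim : Int) : Int :=
  (pvMaiorAux lista inicio fim).2

-- ===== PRECONDITION & SPEC =====
-- exactly the inputs on which the Python A returns: lista[inicio] must exist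
-- (Python negative indexing allowed) and every loop index inicio+1 … fim must be < len.
def Pre_posicao_maior_fisch (lista : List Int) (inicio : Int) (fim : Int) : Prop :=
  PySem.Raise.InRange lista.length inicio ∧ fim < (lista.length : Int)
instance (lista : List Int) (inicio : Int) (fim : Int) : Decidable (Pre_posicao_maior_fisch lista inicio fim) := by unfold Pre_posicao_maior_fisch; infer_instance

def pvWitness_posicao_maior_fisch : List Int × Int × Int := ([3, 1, 4, 1], 0, 3)

def Spec_posicao_maior_fisch (lista : List Int) (inicio : Int) (fim : Int) (out : Int) : Prop := out = posicao_maior_fisch_alt lista inicio fim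
instance (lista : List Int) (inicio : Int) (fim : Int) (out : Int) : Decidable (Spec_posicao_maior_fisch lista inicio fim out) := by unfold Spec_posicao_maior_fisch; infer_instance

-- ===== CLAIM (what is proved, stated in full; the proofs are below) =====
def Claim_equal_posicao_maior_fisch : Prop := ∀ (lista : List Int) (inicio : Int) (fim : Int), Dom_posicao_maior_fisch lista inicio fim → Pre_posicao_maior_fisch lista inicio fim → Spec_posicao_maior_fisch lista inicio fim (posicao_maior_fisch lista inicio fim)

-- ===== LEMMAS AND PROOFS =====

-- reference function: leftmost index of the maximum of lista[inicio..fim], peeling from the right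
def pvM (lista : List Int) (inicio : Int) (fim : Int) : Int :=
  if fim ≤ inicio then inicio
  else
    let j := pvM lista inicio (fim - 1)
    if PySem.List.pyGetD lista fim 0 > PySem.List.pyGetD lista j 0 then fim else j
termination_by (fim - inicio).toNat
decreasing_by omega

-- unfolding equations for pvM with explicit arguments
theorem pvM_base (lista : List Int) (a b : Int) (h : b ≤ a) : pvM lista a b = a := by
  rw [pvM, if_pos h]

theorem pvM_unfold (lista : List Int) (a b : Int) (h : ¬ b ≤ a) :
    pvM lista a b =
      if PySem.List.pyGetD lista b 0 > PySem.List.pyGetD lista (pvM lista a (b - 1)) 0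
      then b else pvM lista a (b - 1) := by
  rw [pvM, if_neg h]

-- A's fold computes pvM, together with the invariant "maior = lista[indice_maior]".
theorem pvFoldA (lista : List Int) (inicio fim : Int) :
    (PySem.List.pyRange (inicio + 1) (fim + 1) 1).foldl
      (fun (s : Int × Int) i =>
        if PySem.List.pyGetD lista i 0 > s.1 then (PySem.List.pyGetD lista i 0, i) else s)
      (PySem.List.pyGetD lista inicio 0, inicio)
    = (PySem.List.pyGetD lista (pvM lista inicio fim) 0, pvM lista inicio fim) := by
  by_cases h : fim ≤ inicio
  · rw [PySem.List.pyRange_one_eq_nil (by omega), pvM_base lista inicio fim h]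
    simp
  · have hr : PySem.List.pyRange (inicio + 1) (fim + 1) 1
        = PySem.List.pyRange (inicio + 1) ((fim - 1) + 1) 1 ++ [fim] := by
      have := PySem.List.pyRange_one_succ_right (a := inicio + 1) (b := fim) (by omega)
      simpa using this
    rw [hr, List.foldl_append, pvFoldA lista inicio (fim - 1),
      pvM_unfold lista inicio fim h]
    simp only [List.foldl_cons, List.foldl_nil]
    split <;> simp
termination_by (fim - inicio).toNat
decreasing_by omega

-- argmax combines across any split point: pvM a c is the better of pvM a b and pvM (b+1) c.
theorem pvM_split (lista : List Int) (a b c : Int) (h1 : a ≤ b) (h2 : b < c) :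
    pvM lista a c =
      if PySem.List.pyGetD lista (pvM lista (b + 1) c) 0 > PySem.List.pyGetD lista (pvM lista a b) 0
      then pvM lista (b + 1) c else pvM lista a b := by
  by_cases hc : c ≤ b + 1
  · have hc' : c = b + 1 := by omega
    subst hc'
    rw [pvM_unfold lista a (b + 1) (by omega)]
    have hb1 : b + 1 - 1 = b := by omega
    rw [hb1, pvM_base lista (b + 1) (b + 1) (by omega)]
  · have ih := pvM_split lista a b (c - 1) h1 (by omega)
    rw [pvM_unfold lista a c (by omega), pvM_unfold lista (b + 1) c (by omega), ih]
    split_ifs <;> omega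
termination_by (c - b).toNat
decreasing_by omega

-- B's helper computes pvM together with the invariant "first component = lista[index]".
theorem pvAux_eq (lista : List Int) (i f : Int) :
    pvMaiorAux lista i f = (PySem.List.pyGetD lista (pvM lista i f) 0, pvM lista i f) := by
  by_cases h : f ≤ i
  · rw [pvMaiorAux, dif_pos h, pvM_base lista i f h]
  · have hge := pvMid_ge i f h
    have hlt := pvMid_lt i f h
    rw [pvMaiorAux, dif_neg h]
    simp only
    rw [pvAux_eq lista i _, pvAux_eq lista _ f,
      pvM_split lista i (PySem.Int.floordiv (i + f) 2) f hge hlt]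
    split_ifs <;> simp_all
termination_by (f - i).toNat
decreasing_by
  · have := pvMid_lt i f h; have := pvMid_ge i f h; omega
  · have := pvMid_lt i f h; have := pvMid_ge i f h; omega

-- ===== VERDICT (by name: the statement is the Claim_ definition above) =====
theorem posicao_maior_fisch_spec : Claim_equal_posicao_maior_fisch := by
  intro lista inicio fim _ _
  unfold Spec_posicao_maior_fisch posicao_maior_fisch
  rw [pvFoldA]
  unfold posicao_maior_fisch_alt
  rw [pvAux_eq]
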